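-- pv_equiv track=rewrite | github.com/RIOT-OS/RIOT | dist/tools/backport_pr/backport_pr.py | _get_latest_release
-- ===== SOURCE A (Python) =====
-- RELEASE_PREFIX = ""
--
-- RELEASE_SUFFIX = "-branch"
--
-- def _branch_name_strip(branch_name, prefix=RELEASE_PREFIX, suffix=RELEASE_SUFFIX):
--     """Strip suffix and prefix.
--
--     >>> _branch_name_strip('2018.10-branch')
--     '2018.10'
--     """
--     if branch_name.startswith(prefix) and branch_name.endswith(suffix):
--         if prefix:
--             branch_name = branch_name.split(prefix, maxsplit=1)[0]
--         if suffix: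
--             branch_name = branch_name.rsplit(suffix, maxsplit=1)[0]
--     return branch_name
--
-- def _get_latest_release(branches):
--     """Get latest release from a list of branches.
--
--     >>> _get_latest_release([{'name': '2018.10-branch'}, \
--         {'name': '2020.10-branch'}])
--     ('2020.10', '2020.10-branch')
--     >>> _get_latest_release([{'name': '2020.01-branch'}, \
--         {'name': '2020.04-branch'}])
--     ('2020.04', '2020.04-branch')
--     >>> _get_latest_release([{'name': 'non-release-branch'}, \
--         {'name': '2020.04-branch'}])
--     ('2020.04', '2020.04-branch')
--     """
--     version_latest = 0
--     release_fullname = ""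
--     release_short = ""
--     for branch in branches:
--         branch_name = _branch_name_strip(branch["name"])
--         branch_num = 0
--         try:
--             branch_num = int("".join(branch_name.split(".")))
--         except ValueError:
--             pass
--         if branch_num > version_latest:
--             version_latest = branch_num
--             release_short = branch_name
--             release_fullname = branch["name"]
--     return (release_short, release_fullname)
-- ===== SOURCE B (Python) =====
-- RELEASE_PREFIX = ""
--
-- RELEASE_SUFFIX = "-branch"
--
--
-- def _branch_name_strip(branch_name, prefix=RELEASE_PREFIX, suffix=RELEASE_SUFFIX):
--     if branch_name.startswith(prefix) and branch_name.endswith(suffix):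
--         if prefix:
--             branch_name = branch_name.split(prefix, maxsplit=1)[0]
--         if suffix:
--             branch_name = branch_name.rsplit(suffix, maxsplit=1)[0]
--     return branch_name
--
--
-- def _version_num(short):
--     try:
--         return int("".join(short.split(".")))
--     except ValueError:
--         return 0
--
--
-- def _get_latest_release(branches):
--     names = [branch["name"] for branch in branches]
--     nums = [_version_num(_branch_name_strip(n)) for n in names]
--     best = max(nums, default=0)
--     if best <= 0:
--         return ("", "")
--     i = nums.index(best)  # first occurrence of the maximum, like A's strict '>'
--     return (_branch_name_strip(names[i]), names[i])
-- ===== Notes on version B (the rewrite author's own statement) =====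
-- stated objective: alternative
-- what changed: Replaces the single-pass strict-argmax accumulator loop with a staged pipeline: materialise the name and version-number lists, take max(nums, default=0), bail out on a nonpositive maximum, then locate the winner with nums.index(best).
import Mathlib
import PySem

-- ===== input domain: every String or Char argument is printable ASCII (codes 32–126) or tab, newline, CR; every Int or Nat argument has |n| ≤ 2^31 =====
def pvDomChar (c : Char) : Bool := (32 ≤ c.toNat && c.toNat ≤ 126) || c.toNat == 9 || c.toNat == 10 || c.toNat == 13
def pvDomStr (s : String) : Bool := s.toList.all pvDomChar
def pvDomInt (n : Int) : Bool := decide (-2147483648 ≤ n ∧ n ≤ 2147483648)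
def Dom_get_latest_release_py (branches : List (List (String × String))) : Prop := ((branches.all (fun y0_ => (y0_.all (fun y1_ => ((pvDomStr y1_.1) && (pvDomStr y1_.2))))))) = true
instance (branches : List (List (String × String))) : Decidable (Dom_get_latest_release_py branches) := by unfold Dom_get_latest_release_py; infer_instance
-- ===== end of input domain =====

-- B stages the computation: materialise the name list and version-number list, take the
-- maximum with default 0, bail out if it is nonpositive, then locate the winner with
-- index(best) — instead of A's single running strict-argmax accumulator loop
-- (alternative decomposition, same cost class).


-- ===== PORT A =====
-- module helper _branch_name_strip (shared by A and B; RELEASE_PREFIX = "", RELEASE_SUFFIX = "-branch"):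
-- prefix "" makes startswith true and skips the 'if prefix' branch; rsplit(suffix, maxsplit=1)[0]
-- is everything before the LAST occurrence of the suffix (the whole string if absent) — exact.
def pvBranchNameStrip (branch_name : String) : String :=
  if PySem.Str.startswith branch_name "" && PySem.Str.endswith branch_name "-branch" then
    let i := PySem.Str.rfind branch_name "-branch"
    if i < 0 then branch_name else PySem.Str.slice branch_name (some 0) (some i)
  else branch_name

-- the try/int("".join(s.split('.')))/except-keep-0 block (A's inline try block = B's _version_num)
def pvBranchNum (s : String) : Int :=
  (PySem.Int.ofStr? (PySem.Str.join "" ((PySem.Str.split? s ".").getD []))).getD 0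

-- A's loop body; branch["name"] (a pure lookup, written out at each use) raises KeyError when
-- the key is absent — those inputs are excluded by Pre_, where the .getD "" is unreachable
def pvStepA (st : Int × String × String) (branch : List (String × String)) : Int × String × String :=
  if pvBranchNum (pvBranchNameStrip ((PySem.Dict.get? (PySem.Dict.mk branch) "name").getD "")) > st.1 then
    (pvBranchNum (pvBranchNameStrip ((PySem.Dict.get? (PySem.Dict.mk branch) "name").getD "")),
     pvBranchNameStrip ((PySem.Dict.get? (PySem.Dict.mk branch) "name").getD ""),
     (PySem.Dict.get? (PySem.Dict.mk branch) "name").getD "")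
  else st

def get_latest_release_py (branches : List (List (String × String))) : String × String :=
  let r := branches.foldl pvStepA ((0 : Int), "", "")
  (r.2.1, r.2.2)

-- ===== PORT B =====
def get_latest_release_py_alt (branches : List (List (String × String))) : String × String :=
  let names := branches.map (fun branch => (PySem.Dict.get? (PySem.Dict.mk branch) "name").getD "")
  let nums := names.map (fun n => pvBranchNum (pvBranchNameStrip n))
  let best := (PySem.List.max? nums (fun x => x)).getD 0
  if best ≤ 0 then ("", "")
  else
    -- nums.index(best): best > 0 implies best ∈ nums, so the .getD 0 default is unreachable
    let i := (PySem.List.index? nums best).getD 0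
    (pvBranchNameStrip (names.getD i ""), names.getD i "")

-- ===== PRECONDITION & SPEC =====
-- Pre_ excludes exactly the inputs where branch["name"] raises KeyError (a branch dict without a "name" key)
def Pre_get_latest_release_py (branches : List (List (String × String))) : Prop :=
  ∀ branch ∈ branches, "name" ∈ branch.map Prod.fst
instance (branches : List (List (String × String))) : Decidable (Pre_get_latest_release_py branches) := by unfold Pre_get_latest_release_py; infer_instance
def pvWitness_get_latest_release_py : (List (List (String × String))) :=
  ([[("name", "2020.10-branch")], [("name", "2018.10-branch")]])
def Spec_get_latest_release_py (branches : List (List (String × String))) (out : String × String) : Prop := out = get_latest_release_py_alt branches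
instance (branches : List (List (String × String))) (out : String × String) : Decidable (Spec_get_latest_release_py branches out) := by unfold Spec_get_latest_release_py; infer_instance

-- ===== CLAIM (what is proved, stated in full; the proofs are below) =====
def Claim_equal_get_latest_release_py : Prop := ∀ (branches : List (List (String × String))), Dom_get_latest_release_py branches → Pre_get_latest_release_py branches → Spec_get_latest_release_py branches (get_latest_release_py branches)

-- ===== LEMMAS AND PROOFS =====

-- proof-only decomposition of A's loop step
def pvName (branch : List (String × String)) : String :=
  (PySem.Dict.get? (PySem.Dict.mk branch) "name").getD ""
def pvTriple (n : String) : Int × String × String :=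
  (pvBranchNum (pvBranchNameStrip n), pvBranchNameStrip n, n)
def pvStep (st t : Int × String × String) : Int × String × String :=
  if t.1 > st.1 then t else st

lemma pvStepA_eq (st : Int × String × String) (b : List (String × String)) :
    pvStepA st b = pvStep st (pvTriple (pvName b)) := by
  unfold pvStepA pvStep pvTriple pvName
  generalize (PySem.Dict.get? (PySem.Dict.mk b) "name").getD "" = name
  generalize pvBranchNameStrip name = bn
  generalize pvBranchNum bn = n
  rfl

lemma pvFoldA_eq (branches : List (List (String × String))) (st : Int × String × String) :
    branches.foldl pvStepA st = ((branches.map pvName).map pvTriple).foldl pvStep st := by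
  rw [List.map_map, List.foldl_map]
  apply PySem.List.foldl_congr_mem
  intro acc x _
  exact pvStepA_eq acc x

lemma pvFoldl_max_comm (t : List Int) (a b : Int) :
    t.foldl max (max a b) = max a (t.foldl max b) := by
  induction t generalizing b with
  | nil => rfl
  | cons y t ih => simp only [List.foldl_cons, max_assoc, ih]

-- characterisation of A's strict-argmax fold: result is st when nothing beats st.1,
-- else the first triple attaining the running maximum
lemma pvFold_char (l : List (Int × String × String)) (st : Int × String × String) :
    l.foldl pvStep st =
      if (l.map Prod.fst).foldl max st.1 ≤ st.1 then st
      else (l.find? (fun t => t.1 == (l.map Prod.fst).foldl max st.1)).getD st := by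
  induction l generalizing st with
  | nil => simp
  | cons x l ih =>
    simp only [List.foldl_cons, List.map_cons, List.find?_cons]
    by_cases hx : x.1 > st.1
    · have hst' : pvStep st x = x := by simp [pvStep, hx]
      rw [hst', ih x]
      have hle : x.1 ≤ (l.map Prod.fst).foldl max x.1 := (PySem.List.le_foldl_max _ _).1
      have hmax : (l.map Prod.fst).foldl max (max st.1 x.1) = (l.map Prod.fst).foldl max x.1 := by
        rw [pvFoldl_max_comm]
        omega
      rw [hmax]
      by_cases hm : (l.map Prod.fst).foldl max x.1 ≤ x.1
      · have : (l.map Prod.fst).foldl max x.1 = x.1 := le_antisymm hm hle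
        rw [this]
        simp [not_le.mpr hx]
      · have hne : ¬ ((l.map Prod.fst).foldl max x.1 ≤ st.1) := by omega
        have hxne : (x.1 == (l.map Prod.fst).foldl max x.1) = false := by
          simp; omega
        simp only [hm, if_false, hne, hxne]
        -- the find? on l is some: the max is a member of l.map Prod.fst
        rcases PySem.List.foldl_max_mem (l.map Prod.fst) x.1 with heq | hmem
        · omega
        · rcases List.mem_map.mp hmem with ⟨t, ht, hteq⟩
          have hsome : (l.find? (fun t => t.1 == (l.map Prod.fst).foldl max x.1)).isSome :=
            List.find?_isSome.mpr ⟨t, ht, by simp [hteq]⟩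
          rcases Option.isSome_iff_exists.mp hsome with ⟨v, hv⟩
          rw [hv]
          rfl
    · have hst' : pvStep st x = st := by simp [pvStep, hx]
      rw [hst', ih st]
      have hmax : max st.1 x.1 = st.1 := by omega
      rw [hmax]
      by_cases hm : (l.map Prod.fst).foldl max st.1 ≤ st.1
      · simp [hm]
      · have hxne : (x.1 == (l.map Prod.fst).foldl max st.1) = false := by
          simp; omega
        simp [hm, hxne]

-- find?/index? correspondence over the name list
lemma pvFindIndex (ns : List String) (m : Int)
    (h : m ∈ ns.map (fun n => pvBranchNum (pvBranchNameStrip n))) :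
    (ns.map pvTriple).find? (fun t => t.1 == m) =
      some (pvTriple (ns.getD ((PySem.List.index? (ns.map (fun n => pvBranchNum (pvBranchNameStrip n))) m).getD 0) "")) := by
  induction ns with
  | nil => simp at h
  | cons n ns ih =>
    by_cases hn : pvBranchNum (pvBranchNameStrip n) = m
    · rw [List.map_cons, List.map_cons, hn, PySem.List.index?_cons_self]
      simp [pvTriple, hn]
    · have hmem : m ∈ ns.map (fun n => pvBranchNum (pvBranchNameStrip n)) := by
        rcases List.mem_map.mp h with ⟨y, hy, hyeq⟩
        rcases List.mem_cons.mp hy with rfl | hy'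
        · exact absurd hyeq hn
        · exact List.mem_map.mpr ⟨y, hy', hyeq⟩
      rcases Option.isSome_iff_exists.mp ((PySem.List.index?_isSome_iff _ _).mpr hmem) with ⟨j, hj⟩
      have hpred : ((pvTriple n).1 == m) = false := by simp [pvTriple, hn]
      rw [List.map_cons, List.map_cons, PySem.List.index?_cons_of_ne _ hn,
        List.find?_cons, hpred, ih hmem, hj]
      simp

lemma pvB_eq (branches : List (List (String × String))) :
    get_latest_release_py_alt branches =
      (if ((PySem.List.max? ((branches.map pvName).map (fun n => pvBranchNum (pvBranchNameStrip n))) (fun x => x)).getD 0) ≤ 0 then ("", "")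
       else (pvBranchNameStrip ((branches.map pvName).getD ((PySem.List.index? ((branches.map pvName).map (fun n => pvBranchNum (pvBranchNameStrip n))) ((PySem.List.max? ((branches.map pvName).map (fun n => pvBranchNum (pvBranchNameStrip n))) (fun x => x)).getD 0)).getD 0) ""),
             (branches.map pvName).getD ((PySem.List.index? ((branches.map pvName).map (fun n => pvBranchNum (pvBranchNameStrip n))) ((PySem.List.max? ((branches.map pvName).map (fun n => pvBranchNum (pvBranchNameStrip n))) (fun x => x)).getD 0)).getD 0) "")) := rfl

lemma pvTriple_fst (ns : List String) :
    (ns.map pvTriple).map Prod.fst = ns.map (fun n => pvBranchNum (pvBranchNameStrip n)) := by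
  induction ns with
  | nil => rfl
  | cons a l ih =>
    simp only [List.map_cons, ih, pvTriple]

-- ===== VERDICT (by name: the statement is the Claim_ definition above) =====
theorem get_latest_release_py_spec : Claim_equal_get_latest_release_py := by
  intro branches _ _
  unfold Spec_get_latest_release_py
  rw [pvB_eq]
  unfold get_latest_release_py
  rw [pvFoldA_eq, pvFold_char, pvTriple_fst]
  set ns := branches.map pvName with hns
  set nums := ns.map (fun n => pvBranchNum (pvBranchNameStrip n)) with hnums
  cases hn : nums with
  | nil =>
    rw [(PySem.List.max?_eq_none_iff (xs := ([] : List Int)) (key := fun x => x)).mpr rfl]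
    simp
  | cons x t =>
    rw [PySem.List.max?_id_cons]
    have hbest : ((some (t.foldl max x)).getD 0 : Int) = t.foldl max x := rfl
    rw [hbest]
    have hm : (x :: t).foldl max (0 : Int) = max 0 (t.foldl max x) := by
      rw [List.foldl_cons, pvFoldl_max_comm]
    rw [hm]
    by_cases hpos : t.foldl max x ≤ 0
    · have h0 : max (0 : Int) (t.foldl max x) = 0 := by omega
      rw [h0]
      simp [hpos]
    · have h0 : max (0 : Int) (t.foldl max x) = t.foldl max x := by omega
      rw [h0]
      have hgt : ¬ (t.foldl max x ≤ ((0 : Int), "", "").1) := hpos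
      rw [if_neg hgt, if_neg hpos]
      have hmem : (t.foldl max x) ∈ nums := by
        have := PySem.List.max?_mem (xs := nums) (key := fun x => x) (m := t.foldl max x)
        apply this
        rw [hn, PySem.List.max?_id_cons]
      rw [hn] at hmem
      have hfind := pvFindIndex ns (t.foldl max x) (by rw [← hnums, hn]; exact hmem)
      rw [← hnums, hn] at hfind
      rw [hfind]
      rfl
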